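-- pv_equiv track=rewrite | github.com/reyn1920/online-production | tools/fix_commented_brackets.py | analyze_bracket_balance
-- ===== SOURCE A (Python) =====
-- from typing import List, Tuple, Dict
--
-- def analyze_bracket_balance(content: str) -> Dict[str, int]:
--     """Analyze bracket balance in the content."""
--     balance = {'(': 0, '[': 0, '{': 0}
--
--     # Count brackets, ignoring those in strings and comments
--     in_string = False
--     in_comment = False
--     string_char = None
--
--     i = 0
--     while i < len(content):
--         char = content[i]
--
--         # Handle string literals
--         if char in ['"', "'"] and not in_comment:
--             if not in_string:
--                 in_string = True
--                 string_char = char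
--             elif char == string_char and (i == 0 or content[i-1] != '\\'):
--                 in_string = False
--                 string_char = None
--
--         # Handle comments
--         elif char == '#' and not in_string:
--             in_comment = True
--         elif char == '\n':
--             in_comment = False
--
--         # Count brackets outside strings and comments
--         elif not in_string and not in_comment:
--             if char == '(':
--                 balance['('] += 1
--             elif char == ')':
--                 balance['('] -= 1
--             elif char == '[':
--                 balance['['] += 1
--             elif char == ']':
--                 balance['['] -= 1
--             elif char == '{':
--                 balance['{'] += 1
--             elif char == '}':
--                 balance['{'] -= 1
--
--         i += 1
--
--     return balance
-- ===== SOURCE B (Python) =====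
-- def analyze_bracket_balance(content: str):
--     """Two-phase: collect code characters outside strings/comments, then tally brackets."""
--     code = []
--     in_string = False
--     in_comment = False
--     string_char = None
--     i = 0
--     while i < len(content):
--         char = content[i]
--         if char in ['"', "'"] and not in_comment:
--             if not in_string:
--                 in_string = True
--                 string_char = char
--             elif char == string_char and (i == 0 or content[i-1] != '\\'):
--                 in_string = False
--                 string_char = None
--         elif char == '#' and not in_string:
--             in_comment = True
--         elif char == '\n':
--             in_comment = False
--         elif not in_string and not in_comment:
--             code.append(char)
--         i += 1
--     code = ''.join(code)
--     return {'(': code.count('(') - code.count(')'),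
--             '[': code.count('[') - code.count(']'),
--             '{': code.count('{') - code.count('}')}
-- ===== Notes on version B (the rewrite author's own statement) =====
-- stated objective: alternative
-- what changed: A's single fused loop that updates three bracket counters while tracking string/comment state is split into a filter-then-tally decomposition: pass 1 runs the same state machine but only collects the code characters, pass 2 computes each balance as count(open) - count(close) on the collected code.
import Mathlib
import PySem

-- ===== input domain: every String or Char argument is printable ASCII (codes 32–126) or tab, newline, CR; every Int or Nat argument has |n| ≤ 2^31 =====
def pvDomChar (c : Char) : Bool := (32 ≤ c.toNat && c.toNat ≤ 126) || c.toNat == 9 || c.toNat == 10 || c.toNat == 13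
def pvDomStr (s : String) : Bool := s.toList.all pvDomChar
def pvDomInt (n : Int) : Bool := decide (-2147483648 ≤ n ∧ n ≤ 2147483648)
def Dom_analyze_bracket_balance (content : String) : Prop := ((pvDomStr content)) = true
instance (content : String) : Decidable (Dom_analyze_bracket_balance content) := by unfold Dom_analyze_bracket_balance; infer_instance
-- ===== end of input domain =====

-- B replaces A's fused count-as-you-scan loop by a filter-then-tally decomposition
-- (collect code characters, then compute each balance from character counts); same values, alternative structure.

-- ===== PORT A =====
-- A's while-loop: state (in_string, in_comment, string_char) plus the three counters;
-- content[i-1] is carried as `prev` (none at i = 0, matching `i == 0 or content[i-1] != '\\'`).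
def abbLoopA : List Char → Option Char → Bool → Bool → Option Char → Int → Int → Int → Int × Int × Int
  | [], _, _, _, _, b1, b2, b3 => (b1, b2, b3)
  | c :: rest, prev, ins, inc, sc, b1, b2, b3 =>
    if (c = '"' ∨ c = '\'') ∧ ¬inc then
      if ¬ins then abbLoopA rest (some c) true inc (some c) b1 b2 b3
      else if some c = sc ∧ prev ≠ some '\\' then abbLoopA rest (some c) false inc none b1 b2 b3
      else abbLoopA rest (some c) ins inc sc b1 b2 b3
    else if c = '#' ∧ ¬ins then abbLoopA rest (some c) ins true sc b1 b2 b3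
    else if c = '\n' then abbLoopA rest (some c) ins false sc b1 b2 b3
    else if ¬ins ∧ ¬inc then
      if c = '(' then abbLoopA rest (some c) ins inc sc (b1 + 1) b2 b3
      else if c = ')' then abbLoopA rest (some c) ins inc sc (b1 - 1) b2 b3
      else if c = '[' then abbLoopA rest (some c) ins inc sc b1 (b2 + 1) b3
      else if c = ']' then abbLoopA rest (some c) ins inc sc b1 (b2 - 1) b3
      else if c = '{' then abbLoopA rest (some c) ins inc sc b1 b2 (b3 + 1)
      else if c = '}' then abbLoopA rest (some c) ins inc sc b1 b2 (b3 - 1)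
      else abbLoopA rest (some c) ins inc sc b1 b2 b3
    else abbLoopA rest (some c) ins inc sc b1 b2 b3

def analyze_bracket_balance (content : String) : List (String × Int) :=
  let r := abbLoopA content.toList none false false none 0 0 0
  [("(", r.1), ("[", r.2.1), ("{", r.2.2)]

-- ===== PORT B =====
-- Pass 1 of B: the same string/comment state machine, but it only COLLECTS the code characters.
def abbCollect : List Char → Option Char → Bool → Bool → Option Char → List Char
  | [], _, _, _, _ => []
  | c :: rest, prev, ins, inc, sc =>
    if (c = '"' ∨ c = '\'') ∧ ¬inc then
      if ¬ins then abbCollect rest (some c) true inc (some c)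
      else if some c = sc ∧ prev ≠ some '\\' then abbCollect rest (some c) false inc none
      else abbCollect rest (some c) ins inc sc
    else if c = '#' ∧ ¬ins then abbCollect rest (some c) ins true sc
    else if c = '\n' then abbCollect rest (some c) ins false sc
    else if ¬ins ∧ ¬inc then c :: abbCollect rest (some c) ins inc sc
    else abbCollect rest (some c) ins inc sc

-- Pass 2 of B: tally the collected characters (str.count on the joined code).
def analyze_bracket_balance_alt (content : String) : List (String × Int) :=
  let code := abbCollect content.toList none false false none
  [("(", (code.count '(' : Int) - (code.count ')' : Int)),
   ("[", (code.count '[' : Int) - (code.count ']' : Int)),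
   ("{", (code.count '{' : Int) - (code.count '}' : Int))]

-- ===== PRECONDITION & SPEC =====
def Spec_analyze_bracket_balance (content : String) (out : List (String × Int)) : Prop := out = analyze_bracket_balance_alt content
instance (content : String) (out : List (String × Int)) : Decidable (Spec_analyze_bracket_balance content out) := by unfold Spec_analyze_bracket_balance; infer_instance

-- ===== CLAIM (what is proved, stated in full; the proofs are below) =====
def Claim_equal_analyze_bracket_balance : Prop := ∀ (content : String), Dom_analyze_bracket_balance content → Spec_analyze_bracket_balance content (analyze_bracket_balance content)

-- ===== LEMMAS AND PROOFS =====

-- A's running counters equal the initial counters plus the bracket tallies of B's collected code.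
lemma abbLoopA_eq_collect : ∀ (cs : List Char) (prev : Option Char) (ins inc : Bool) (sc : Option Char) (b1 b2 b3 : Int),
    abbLoopA cs prev ins inc sc b1 b2 b3 =
      (b1 + ((abbCollect cs prev ins inc sc).count '(' : Int) - ((abbCollect cs prev ins inc sc).count ')' : Int),
       b2 + ((abbCollect cs prev ins inc sc).count '[' : Int) - ((abbCollect cs prev ins inc sc).count ']' : Int),
       b3 + ((abbCollect cs prev ins inc sc).count '{' : Int) - ((abbCollect cs prev ins inc sc).count '}' : Int)) := by
  intro cs
  induction cs with
  | nil => intro prev ins inc sc b1 b2 b3; simp [abbLoopA, abbCollect]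
  | cons c rest ih =>
    intro prev ins inc sc b1 b2 b3
    simp only [abbLoopA, abbCollect]
    split_ifs <;> rw [ih] <;> clear ih <;> simp_all [Prod.mk.injEq] <;> omega

-- ===== VERDICT (by name: the statement is the Claim_ definition above) =====
theorem analyze_bracket_balance_spec : Claim_equal_analyze_bracket_balance := by
  intro content _
  unfold Spec_analyze_bracket_balance analyze_bracket_balance analyze_bracket_balance_alt
  simp [abbLoopA_eq_collect]
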